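-- pv_equiv track=rewrite | github.com/ddu0422/study | algorithm/programmers/level1/fruits.py | solution
-- ===== SOURCE A (Python) =====
-- def solution(k, m, score):
--     answer = 0
--     score = sorted(score, reverse=True)
--
--     for i in range(0, len(score), m):
--         box = score[i:i + m]
--
--         if len(box) == m:
--             answer += box[-1] * m
--
--     return answer
-- ===== SOURCE B (Python) =====
-- def solution(k, m, score):
--     # A full box of the descending order takes the m largest remaining scores, so the
--     # n % m smallest scores never fill a box; in ASCENDING order the full-box minima are
--     # exactly the elements whose index is congruent to n % m (mod m).
--     if m <= 0:
--         return 0  # a box of non-positive size is never full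
--     s = sorted(score)
--     r = len(s) % m
--     total = 0
--     for i, v in enumerate(s):
--         if i % m == r:
--             total += v
--     return m * total
-- ===== Notes on version B (the rewrite author's own statement) =====
-- stated objective: alternative
-- what changed: A sorts descending and slices out each m-box, keeping it only when full and adding its last element times m; B sorts ascending, observes that the n%m smallest scores never fill a box, and accumulates in one enumerate pass the elements whose index is congruent to n%m modulo m, multiplying the running sum by m once; non-positive m yields 0 up front.
import Mathlib
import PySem

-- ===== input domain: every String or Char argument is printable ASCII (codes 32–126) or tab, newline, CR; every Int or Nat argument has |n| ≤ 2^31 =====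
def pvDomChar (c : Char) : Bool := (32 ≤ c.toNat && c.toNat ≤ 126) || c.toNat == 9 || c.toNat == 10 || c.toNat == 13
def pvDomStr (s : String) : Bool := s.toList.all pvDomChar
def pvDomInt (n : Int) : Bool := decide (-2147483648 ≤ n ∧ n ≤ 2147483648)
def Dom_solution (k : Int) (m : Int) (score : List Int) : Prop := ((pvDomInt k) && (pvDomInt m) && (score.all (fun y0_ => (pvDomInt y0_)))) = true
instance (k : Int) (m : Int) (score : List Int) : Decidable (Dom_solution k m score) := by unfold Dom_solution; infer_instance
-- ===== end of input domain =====

-- B sorts ascending and sums, in one enumerate pass, the elements whose index ≡ n % m (mod m)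
-- (the minima of A's full descending boxes), instead of slicing descending boxes (alternative; same cost).


-- ===== PORT A =====
-- Port of A: fold over range(0, len(s), m); box = s[i:i+m]; add box[-1]*m when len(box)==m.
-- box[-1] is ported as pyGetD with default 0: Python only evaluates it when len(box)==m, and the
-- branch can only reach an empty box when m == 0, which Pre_solution excludes (range step 0 raises).
def solution (k : Int) (m : Int) (score : List Int) : Int :=
  let s := PySem.List.sorted score (fun x => x) true
  (PySem.List.pyRange 0 (PySem.List.len s) m).foldl
    (fun answer i =>
      let box := PySem.List.slice s (some i) (some (i + m))
      if PySem.List.len box = m then answer + PySem.List.pyGetD box (-1) 0 * m else answer) 0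

-- ===== PORT B =====
-- Port of B: non-positive m has no full boxes; otherwise sort ascending, r = len(s) % m,
-- one pass over enumerate(s) adding v when i % m == r, result multiplied by m once.
def solution_alt (k : Int) (m : Int) (score : List Int) : Int :=
  if m ≤ 0 then 0
  else
    let s := PySem.List.sorted score (fun x => x) false
    let r := PySem.Int.mod (PySem.List.len s) m
    m * ((PySem.List.enumerate s 0).foldl
          (fun total iv => if PySem.Int.mod iv.1 m = r then total + iv.2 else total) 0)

-- ===== PRECONDITION & SPEC =====
-- Pre_ excludes exactly m = 0, the only input A raises on (range(0, len(score), 0) is a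
-- ValueError); B returns 0 there.
def Pre_solution (k : Int) (m : Int) (score : List Int) : Prop := m ≠ 0
instance (k : Int) (m : Int) (score : List Int) : Decidable (Pre_solution k m score) := by
  unfold Pre_solution; infer_instance
def pvWitness_solution : Int × Int × List Int := (4, 2, [1, 2, 3, 4, 5])

def Spec_solution (k : Int) (m : Int) (score : List Int) (out : Int) : Prop := out = solution_alt k m score
instance (k : Int) (m : Int) (score : List Int) (out : Int) : Decidable (Spec_solution k m score out) := by unfold Spec_solution; infer_instance

-- ===== CLAIM (what is proved, stated in full; the proofs are below) =====
def Claim_equal_solution : Prop := ∀ (k : Int) (m : Int) (score : List Int), Dom_solution k m score → Pre_solution k m score → Spec_solution k m score (solution k m score)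

-- ===== LEMMAS AND PROOFS =====

-- range(0, n, m) with m < 0 and 0 ≤ n is empty (A's loop body never runs)
lemma pyRange_neg_step_nil (n : Nat) (m : Int) (hm : m < 0) :
    PySem.List.pyRange 0 (n : Int) m = [] := by
  simp only [PySem.List.pyRange]
  split_ifs <;> first | rfl | omega

lemma box_eq (s : List Int) (mn k : Nat) :
    PySem.List.slice s (some ((mn : Int) * (k : Int))) (some ((mn : Int) * (k : Int) + (mn : Int)))
      = (s.drop (mn * k)).take mn := by
  have h := PySem.List.slice_natCast_add s (mn * k) mn
  push_cast at h
  convert h using 3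

lemma box_last (s : List Int) (mn k : Nat) (hmn : 1 ≤ mn) (h : mn * (k + 1) ≤ s.length) :
    PySem.List.pyGetD ((s.drop (mn * k)).take mn) (-1) 0 = s.getD (mn * k + (mn - 1)) 0 := by
  rw [Nat.mul_succ] at h
  have hlen : ((s.drop (mn * k)).take mn).length = mn := by simp; omega
  simp only [PySem.List.pyGetD, PySem.List.pyGet?, PySem.List.pyIdx?, hlen]
  rw [if_neg (by omega), if_pos (by omega)]
  simp only [Option.bind_some]
  have h1 : mn - (-(-1:Int)).toNat = mn - 1 := by norm_num
  rw [h1, List.getElem?_take, List.getElem?_drop, if_pos (by omega)]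
  have h2 : mn * k + (mn - 1) < s.length := by omega
  rw [List.getD_eq_getElem?_getD]

lemma sum_map_range (n : Nat) (f : Nat → Int) :
    ((List.range n).map f).sum = ∑ k ∈ Finset.range n, f k := Int.neg_inj.mp rfl

-- A's loop equals the sum of the full-box minima (taken from the descending list) times mn
lemma coreA (mn : Nat) (hmn : 1 ≤ mn) (s : List Int) :
    (PySem.List.pyRange 0 (PySem.List.len s) (mn : Int)).foldl
      (fun answer i =>
        let box := PySem.List.slice s (some i) (some (i + (mn : Int)))
        if PySem.List.len box = (mn : Int) then answer + PySem.List.pyGetD box (-1) 0 * (mn : Int) else answer) 0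
    = ∑ k ∈ Finset.range (s.length / mn), s.getD (mn * k + (mn - 1)) 0 * (mn : Int) := by
  have hm0 : (0:Int) < (mn:Int) := by exact_mod_cast hmn
  set n := s.length with hn
  have hlen : PySem.List.len s = (n : Int) := rfl
  rw [hlen, PySem.List.pyRange_of_pos _ _ hm0]
  set cA := (if (0:Int) < (n:Int) then (((n:Int) - 0 + (mn:Int) - 1) / (mn:Int)).toNat else 0) with hcA
  set nd := n / mn with hnd
  have hndA : nd ≤ cA := by
    rw [hcA, hnd]
    split_ifs with h
    · have : ((n:Int) - 0 + (mn:Int) - 1) = ((n + mn - 1 : Nat) : Int) := by omega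
      rw [this, ← Int.natCast_div, Int.toNat_natCast]
      exact Nat.div_le_div_right (by omega)
    · have : n = 0 := by omega
      simp [this]
  rw [List.foldl_map]
  have hbody : (fun (answer : Int) (k : Nat) =>
        let box := PySem.List.slice s (some ((0:Int) + (mn:Int) * (k:Int))) (some ((0:Int) + (mn:Int) * (k:Int) + (mn:Int)))
        if PySem.List.len box = (mn : Int) then answer + PySem.List.pyGetD box (-1) 0 * (mn : Int) else answer)
      = (fun answer k => answer +
          (if mn * (k + 1) ≤ n then s.getD (mn * k + (mn - 1)) 0 * (mn:Int) else 0)) := by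
    funext a k
    simp only [zero_add]
    rw [box_eq s mn k]
    have hblen : PySem.List.len ((s.drop (mn * k)).take mn) = ((min mn (n - mn * k) : Nat) : Int) := by
      simp [PySem.List.len]
      rfl
    rw [hblen]
    have hcond : (((min mn (n - mn * k) : Nat) : Int) = (mn : Int)) ↔ (mn * (k + 1) ≤ n) := by
      rw [Nat.mul_succ]
      constructor
      · intro h; have := Int.ofNat_inj.mp h; omega
      · intro h; congr 1; omega
    by_cases hc : mn * (k + 1) ≤ n
    · rw [if_pos (hcond.mpr hc), if_pos hc, box_last s mn k hmn hc]
    · rw [if_neg (fun hh => hc (hcond.mp hh)), if_neg hc, add_zero]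
  rw [hbody, PySem.List.foldl_add, zero_add, sum_map_range]
  have hiff : ∀ k : Nat, mn * (k + 1) ≤ n ↔ k < nd := by
    intro k
    rw [hnd, Nat.lt_iff_add_one_le, Nat.le_div_iff_mul_le (by omega), Nat.mul_comm]
  rw [← Finset.sum_subset
      (by intro x hx; simp only [Finset.mem_range] at hx ⊢; omega : Finset.range nd ⊆ Finset.range cA)
      (fun x _ hx => by rw [if_neg (fun hc => hx (Finset.mem_range.mpr ((hiff x).mp hc)))])]
  exact Finset.sum_congr rfl (fun k hk => by rw [if_pos ((hiff k).mpr (Finset.mem_range.mp hk))])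

-- descending sort is the reverse of the ascending sort (as lists of Ints)
lemma desc_eq_rev (xs : List Int) :
    PySem.List.sorted xs (fun x => x) true = (PySem.List.sorted xs (fun x => x) false).reverse := by
  refine List.Perm.eq_of_pairwise (le := fun a b : Int => b ≤ a)
    (fun a b _ _ h1 h2 => le_antisymm h2 h1)
    (PySem.List.sorted_pairwise_rev xs (fun x => x))
    ((List.pairwise_reverse).mpr (PySem.List.sorted_pairwise xs (fun x => x)))
    ?_
  exact (PySem.List.sorted_perm xs (fun x => x) true).trans
      ((PySem.List.sorted_perm xs (fun x => x) false).symm.trans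
        (List.reverse_perm _).symm)

lemma getD_reverse (l : List Int) (i : Nat) (h : i < l.length) :
    l.reverse.getD i 0 = l.getD (l.length - 1 - i) 0 := by
  rw [List.getD_eq_getElem _ _ (by simpa using h), List.getD_eq_getElem _ _ (by omega),
    List.getElem_reverse]

-- indices < n congruent to n % mn (mod mn) are exactly n % mn + mn * j for j < n / mn
lemma mod_sum (mn n : Nat) (hmn : 1 ≤ mn) (f : Nat → Int) :
    ∑ i ∈ Finset.range n, (if i % mn = n % mn then f i else 0)
      = ∑ j ∈ Finset.range (n / mn), f (n % mn + mn * j) := by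
  rw [← Finset.sum_filter]
  have himg : (Finset.range n).filter (fun i => i % mn = n % mn)
      = (Finset.range (n / mn)).image (fun j => n % mn + mn * j) := by
    ext i
    simp only [Finset.mem_filter, Finset.mem_image, Finset.mem_range]
    constructor
    · rintro ⟨hin, hmod⟩
      refine ⟨i / mn, ?_, ?_⟩
      · have hi := Nat.div_add_mod i mn
        have hn := Nat.div_add_mod n mn
        have hlt : mn * (i / mn) < mn * (n / mn) := by omega
        exact Nat.lt_of_mul_lt_mul_left hlt
      · have hi := Nat.div_add_mod i mn
        omega
    · rintro ⟨j, hj, rfl⟩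
      have hr : n % mn < mn := Nat.mod_lt _ (by omega)
      constructor
      · have hn := Nat.div_add_mod n mn
        have hle : mn * (j + 1) ≤ mn * (n / mn) := Nat.mul_le_mul_left _ (by omega)
        have hC : mn * (j + 1) = mn * j + mn := by ring
        omega
      · rw [Nat.add_mul_mod_self_left, Nat.mod_eq_of_lt hr]
  rw [himg, Finset.sum_image]
  intro a _ b _ hab
  have := Nat.add_left_cancel hab
  exact Nat.eq_of_mul_eq_mul_left (by omega) this

-- B's loop equals the sum of the same minima taken from the ascending list
lemma coreB (mn : Nat) (hmn : 1 ≤ mn) (s : List Int) :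
    (PySem.List.enumerate s 0).foldl
      (fun total iv => if PySem.Int.mod iv.1 (mn : Int) = PySem.Int.mod (PySem.List.len s) (mn : Int) then total + iv.2 else total) 0
      = ∑ j ∈ Finset.range (s.length / mn), s.getD (s.length % mn + mn * j) 0 := by
  have hbody : (fun (total : Int) (iv : Int × Int) =>
      if PySem.Int.mod iv.1 (mn : Int) = PySem.Int.mod (PySem.List.len s) (mn : Int) then total + iv.2 else total)
      = (fun total iv => total +
          (if PySem.Int.mod iv.1 (mn : Int) = PySem.Int.mod (PySem.List.len s) (mn : Int) then iv.2 else 0)) := by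
    funext t iv
    split_ifs <;> simp
  rw [hbody, PySem.List.foldl_add, zero_add,
    PySem.List.enumerate_eq_map_pyRange (d := 0), List.map_map,
    PySem.List.pyRange_one, List.map_map, sum_map_range]
  have hlen : PySem.List.len s = ((s.length : Nat) : Int) := rfl
  have htoNat : ((PySem.List.len s - 0).toNat) = s.length := by
    rw [hlen]; simp
  rw [htoNat]
  calc ∑ i ∈ Finset.range s.length,
        ((fun iv : Int × Int => if PySem.Int.mod iv.1 (mn : Int) = PySem.Int.mod (PySem.List.len s) (mn : Int) then iv.2 else 0) ∘
          ((fun j : Int => (j, PySem.List.pyGetD s j 0)) ∘ fun k : Nat => (0 : Int) + (k : Int))) i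
      = ∑ i ∈ Finset.range s.length, (if i % mn = s.length % mn then s.getD i 0 else 0) := by
        refine Finset.sum_congr rfl (fun i _ => ?_)
        simp only [Function.comp_apply, zero_add, hlen, PySem.Int.mod_natCast,
          PySem.List.pyGetD_natCast, Nat.cast_inj]
    _ = ∑ j ∈ Finset.range (s.length / mn), s.getD (s.length % mn + mn * j) 0 :=
        mod_sum mn s.length hmn _

-- ===== VERDICT (by name: the statement is the Claim_ definition above) =====
theorem solution_spec : Claim_equal_solution := by
  intro k m score _ hpre
  unfold Spec_solution solution solution_alt
  rcases lt_trichotomy m 0 with hm | hm | hm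
  · simp only [if_pos hm.le, PySem.List.len]
    rw [pyRange_neg_step_nil _ _ hm]
    rfl
  · exact absurd hm hpre
  · have hm1 : m = ((m.toNat : Int)) := by omega
    have hmn : 1 ≤ m.toNat := by omega
    rw [if_neg (by omega), hm1]
    simp only []
    set mn := m.toNat with hmn'
    set asc := PySem.List.sorted score (fun x => x) false with hasc
    set n := asc.length with hnn
    have hdlen : (PySem.List.sorted score (fun x => x) true).length = n := by
      rw [desc_eq_rev, List.length_reverse]
    rw [coreA mn hmn, coreB mn hmn]
    rw [hdlen]
    set d := n / mn with hd
    set r := n % mn with hr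
    have hnd : mn * d + r = n := by rw [hd, hr]; exact Nat.div_add_mod n mn
    have hidx : ∀ k, k < d → n - 1 - (mn * k + (mn - 1)) = r + mn * (d - 1 - k) := by
      intro k hk
      have h1 : mn * (d - 1 - k) = mn * d - mn * (k + 1) := by
        have he : d - 1 - k = d - (k + 1) := by omega
        rw [he, Nat.mul_sub]
      have h2 : mn * (k + 1) = mn * k + mn := by ring
      have h3 : mn * (k + 1) ≤ mn * d := Nat.mul_le_mul_left _ (by omega)
      omega
    have hstep : ∀ k ∈ Finset.range d,
        (PySem.List.sorted score (fun x => x) true).getD (mn * k + (mn - 1)) 0 * (mn : Int)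
          = asc.getD (r + mn * (d - 1 - k)) 0 * (mn : Int) := by
      intro k hk
      have hk' := Finset.mem_range.mp hk
      have h3 : mn * (k + 1) ≤ mn * d := Nat.mul_le_mul_left _ (by omega)
      have h2 : mn * (k + 1) = mn * k + mn := by ring
      have hlt : mn * k + (mn - 1) < n := by omega
      have hlt2 : mn * k + (mn - 1) < (PySem.List.sorted score (fun x => x) false).length := by
        rw [← hasc, ← hnn]; exact hlt
      rw [desc_eq_rev, getD_reverse _ _ hlt2]
      rw [← hasc, ← hnn, hidx k hk']
    rw [Finset.sum_congr rfl hstep, ← Finset.sum_mul]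
    have hrefl : ∑ k ∈ Finset.range d, asc.getD (r + mn * (d - 1 - k)) 0
        = ∑ j ∈ Finset.range d, asc.getD (r + mn * j) 0 :=
      Finset.sum_range_reflect (fun j => asc.getD (r + mn * j) 0) d
    rw [hrefl, mul_comm]
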